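-- pv_equiv track=rewrite | github.com/roninsharma25/Communication-User-Tool | JAUT/datasetParser.py | detectSkills
-- ===== SOURCE A (Python) =====
-- def detectSkills(phrase, skillFields):
--     skills = [i for i in skillFields if isinstance(i, str)]
--
--     # ADD MORE CASES IF NEEDED
--     if 'write' in phrase or 'written' in phrase:
--         skills += ['written']
--     if 'verbal' in phrase:
--         skills += ['verbal']
--     if 'aural' in phrase:
--         skills += ['aural']
--     if 'team' in phrase or 'teamwork' in phrase:
--         skills += ['team']
--
--     return list(set(skills))
-- ===== SOURCE B (Python) =====
-- # One left-to-right scan of the phrase (a naive multi-pattern matcher): at each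
-- # position every keyword is tried with startswith, collecting matched labels in
-- # a set; the labels are then emitted in canonical order.
-- KEYWORDS = [('write', 'written'), ('written', 'written'), ('verbal', 'verbal'),
--             ('aural', 'aural'), ('team', 'team'), ('teamwork', 'team')]
-- LABELS = ['written', 'verbal', 'aural', 'team']
--
-- def detectSkills(phrase, skillFields):
--     hits = set()
--     for pos in range(len(phrase)):
--         for kw, label in KEYWORDS:
--             if phrase.startswith(kw, pos):
--                 hits.add(label)
--     skills = [i for i in skillFields if isinstance(i, str)] + [l for l in LABELS if l in hits]
--     return list(set(skills))
-- ===== Notes on version B (the rewrite author's own statement) =====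
-- stated objective: alternative
-- what changed: Instead of four independent substring-membership tests, B makes a single left-to-right scan of the phrase (a naive multi-pattern matcher), trying every keyword with startswith at each position and accumulating matched labels in a set, then emits labels in canonical order.
import Mathlib
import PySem

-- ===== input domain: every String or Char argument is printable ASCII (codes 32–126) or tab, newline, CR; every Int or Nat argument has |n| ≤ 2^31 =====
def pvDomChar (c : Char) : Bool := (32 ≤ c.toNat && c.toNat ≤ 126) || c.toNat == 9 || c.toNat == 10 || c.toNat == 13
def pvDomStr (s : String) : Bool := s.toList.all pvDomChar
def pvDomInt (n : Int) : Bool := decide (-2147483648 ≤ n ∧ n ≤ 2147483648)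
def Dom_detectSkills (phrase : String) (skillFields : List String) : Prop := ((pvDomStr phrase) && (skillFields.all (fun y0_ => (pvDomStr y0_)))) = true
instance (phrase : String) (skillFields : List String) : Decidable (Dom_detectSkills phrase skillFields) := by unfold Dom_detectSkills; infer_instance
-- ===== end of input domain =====

-- B replaces A's four substring-membership tests by one left-to-right scan of the phrase
-- (a naive multi-pattern matcher collecting matched labels in a set); alternative, same cost.
-- ===== PORT A =====
-- Port of A: filter (isinstance str is always true here), four if-branches, list(set(...)).
def detectSkills (phrase : String) (skillFields : List String) : List String :=
  let skills := skillFields.filter (fun _ => true)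
  let skills := if PySem.Str.isIn "write" phrase || PySem.Str.isIn "written" phrase then skills ++ ["written"] else skills
  let skills := if PySem.Str.isIn "verbal" phrase then skills ++ ["verbal"] else skills
  let skills := if PySem.Str.isIn "aural" phrase then skills ++ ["aural"] else skills
  let skills := if PySem.Str.isIn "team" phrase || PySem.Str.isIn "teamwork" phrase then skills ++ ["team"] else skills
  PySem.Set.ofList skills

-- ===== PORT B =====
-- Port of B: one scan over the phrase positions; at each position every (keyword, label)
-- pair is tried with startswith (phrase.startswith(kw, pos) = startswith of the drop at pos,
-- exact for 0 ≤ pos); matched labels collect in a set, then labels are emitted in canonical order.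
def skillKeywords : List (String × String) :=
  [("write", "written"), ("written", "written"), ("verbal", "verbal"),
   ("aural", "aural"), ("team", "team"), ("teamwork", "team")]

def skillLabels : List String := ["written", "verbal", "aural", "team"]

def detectSkills_alt (phrase : String) (skillFields : List String) : List String :=
  let hits : PySem.Set String := (List.range phrase.length).foldl (fun acc pos =>
      skillKeywords.foldl (fun acc kv =>
        if PySem.Chars.startswith (phrase.toList.drop pos) kv.1.toList then PySem.Set.add acc kv.2
        else acc) acc) PySem.Set.empty
  let skills := (skillFields.filter (fun _ => true)) ++ skillLabels.filter (fun l => l ∈ hits)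
  PySem.Set.ofList skills

-- ===== PRECONDITION & SPEC =====
def Spec_detectSkills (phrase : String) (skillFields : List String) (out : List String) : Prop := out = detectSkills_alt phrase skillFields
instance (phrase : String) (skillFields : List String) (out : List String) : Decidable (Spec_detectSkills phrase skillFields out) := by unfold Spec_detectSkills; infer_instance

-- ===== CLAIM (what is proved, stated in full; the proofs are below) =====
def Claim_equal_detectSkills : Prop := ∀ (phrase : String) (skillFields : List String), Dom_detectSkills phrase skillFields → Spec_detectSkills phrase skillFields (detectSkills phrase skillFields)

-- ===== LEMMAS AND PROOFS =====

-- The inner keyword loop of B, named for the proofs below.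
def hitStep (s : List Char) (acc : PySem.Set String) (pos : Nat) : PySem.Set String :=
  skillKeywords.foldl (fun acc kv =>
    if PySem.Chars.startswith (s.drop pos) kv.1.toList then PySem.Set.add acc kv.2 else acc) acc

lemma mem_kwFold (s : List Char) (pos : Nat) (kvs : List (String × String))
    (acc : PySem.Set String) (l : String) :
    (l ∈ kvs.foldl (fun acc kv =>
        if PySem.Chars.startswith (s.drop pos) kv.1.toList then PySem.Set.add acc kv.2 else acc) acc) ↔
      l ∈ acc ∨ ∃ kv ∈ kvs, l = kv.2 ∧ PySem.Chars.startswith (s.drop pos) kv.1.toList = true := by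
  induction kvs generalizing acc with
  | nil => simp
  | cons kv kvs ih =>
    simp only [List.foldl]
    rw [ih]
    by_cases h : PySem.Chars.startswith (s.drop pos) kv.1.toList = true
    · simp only [h, if_true, PySem.Set.mem_add, List.exists_mem_cons_iff]
      tauto
    · simp only [if_neg h, List.exists_mem_cons_iff]
      tauto

lemma mem_hitStep (s : List Char) (acc : PySem.Set String) (pos : Nat) (l : String) :
    l ∈ hitStep s acc pos ↔ l ∈ acc ∨
      ∃ kv ∈ skillKeywords, l = kv.2 ∧ PySem.Chars.startswith (s.drop pos) kv.1.toList = true :=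
  mem_kwFold s pos skillKeywords acc l

lemma mem_hitsLoop (s : List Char) (n : Nat) (l : String) :
    l ∈ (List.range n).foldl (hitStep s) PySem.Set.empty ↔
      ∃ pos < n, ∃ kv ∈ skillKeywords, l = kv.2 ∧
        PySem.Chars.startswith (s.drop pos) kv.1.toList = true := by
  induction n with
  | zero => simp [PySem.Set.empty]
  | succ n ih =>
    rw [List.range_succ, List.foldl_append]
    simp only [List.foldl, mem_hitStep, ih]
    constructor
    · rintro (⟨pos, hp, hk⟩ | hk)
      · exact ⟨pos, Nat.lt_succ_of_lt hp, hk⟩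
      · exact ⟨n, Nat.lt_succ_self n, hk⟩
    · rintro ⟨pos, hp, hk⟩
      rcases Nat.lt_succ_iff_lt_or_eq.mp hp with h | h
      · exact Or.inl ⟨pos, h, hk⟩
      · subst h; exact Or.inr hk

-- One scan position finding kw ⇔ kw occurs as a substring (kw nonempty).
lemma exists_startswith_iff_isIn (s kw : List Char) (hk : kw ≠ []) :
    (∃ pos < s.length, PySem.Chars.startswith (s.drop pos) kw = true) ↔
      PySem.Chars.isIn kw s = true := by
  rw [← PySem.Chars.exists_prefix_drop_iff_isIn]
  constructor
  · rintro ⟨pos, _, h⟩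
    exact ⟨pos, (PySem.Chars.startswith_iff _ _).mp h⟩
  · rintro ⟨j, h⟩
    by_cases hj : j < s.length
    · exact ⟨j, hj, (PySem.Chars.startswith_iff _ _).mpr h⟩
    · rw [List.drop_eq_nil_of_le (Nat.le_of_not_lt hj)] at h
      exact absurd (List.prefix_nil.mp h) hk

-- Membership of a label in the scan's hit set ⇔ some of its keywords is a substring.
lemma mem_hits_iff (s : List Char) (n : Nat) (hn : n = s.length) (kws : List (List Char)) (l : String)
    (hmem : ∀ kv ∈ skillKeywords, l = kv.2 → kv.1.toList ∈ kws)
    (hmem' : ∀ kw ∈ kws, ∃ kv ∈ skillKeywords, l = kv.2 ∧ kv.1.toList = kw)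
    (hne : ∀ kw ∈ kws, kw ≠ []) :
    (l ∈ (List.range n).foldl (hitStep s) PySem.Set.empty) ↔
      ∃ kw ∈ kws, PySem.Chars.isIn kw s = true := by
  subst hn
  rw [mem_hitsLoop]
  constructor
  · rintro ⟨pos, hp, kv, hkv, hl, hsw⟩
    exact ⟨kv.1.toList, hmem kv hkv hl,
      (exists_startswith_iff_isIn s _ (hne _ (hmem kv hkv hl))).mp ⟨pos, hp, hsw⟩⟩
  · rintro ⟨kw, hkw, hin⟩
    obtain ⟨pos, hp, hsw⟩ := (exists_startswith_iff_isIn s kw (hne kw hkw)).mpr hin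
    obtain ⟨kv, hkv, hl, hk⟩ := hmem' kw hkw
    exact ⟨pos, hp, kv, hkv, hl, hk ▸ hsw⟩

lemma phrase_len (phrase : String) : phrase.length = phrase.toList.length := by
  simp

-- ===== VERDICT (by name: the statement is the Claim_ definition above) =====
theorem detectSkills_spec : Claim_equal_detectSkills := by
  intro phrase skillFields _
  unfold Spec_detectSkills detectSkills detectSkills_alt
  have hw : ("written" ∈ (List.range phrase.length).foldl (hitStep phrase.toList) PySem.Set.empty) ↔
      PySem.Chars.isIn ['w', 'r', 'i', 't', 'e'] phrase.toList = true ∨ PySem.Chars.isIn ['w', 'r', 'i', 't', 't', 'e', 'n'] phrase.toList = true := by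
    rw [mem_hits_iff phrase.toList phrase.length (phrase_len phrase) [['w', 'r', 'i', 't', 'e'], ['w', 'r', 'i', 't', 't', 'e', 'n']]] <;> simp [skillKeywords]
  have hv : ("verbal" ∈ (List.range phrase.length).foldl (hitStep phrase.toList) PySem.Set.empty) ↔
      PySem.Chars.isIn ['v', 'e', 'r', 'b', 'a', 'l'] phrase.toList = true := by
    rw [mem_hits_iff phrase.toList phrase.length (phrase_len phrase) [['v', 'e', 'r', 'b', 'a', 'l']]] <;> simp [skillKeywords]
  have ha : ("aural" ∈ (List.range phrase.length).foldl (hitStep phrase.toList) PySem.Set.empty) ↔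
      PySem.Chars.isIn ['a', 'u', 'r', 'a', 'l'] phrase.toList = true := by
    rw [mem_hits_iff phrase.toList phrase.length (phrase_len phrase) [['a', 'u', 'r', 'a', 'l']]] <;> simp [skillKeywords]
  have ht : ("team" ∈ (List.range phrase.length).foldl (hitStep phrase.toList) PySem.Set.empty) ↔
      PySem.Chars.isIn ['t', 'e', 'a', 'm'] phrase.toList = true ∨ PySem.Chars.isIn ['t', 'e', 'a', 'm', 'w', 'o', 'r', 'k'] phrase.toList = true := by
    rw [mem_hits_iff phrase.toList phrase.length (phrase_len phrase) [['t', 'e', 'a', 'm'], ['t', 'e', 'a', 'm', 'w', 'o', 'r', 'k']]] <;> simp [skillKeywords]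
  simp only [PySem.Set.empty] at hw hv ha ht
  rw [show (fun (acc : PySem.Set String) (pos : Nat) =>
      List.foldl (fun acc kv =>
        if PySem.Chars.startswith (phrase.toList.drop pos) kv.1.toList then PySem.Set.add acc kv.2
        else acc) acc skillKeywords) = hitStep phrase.toList from rfl]
  by_cases b1 : PySem.Chars.isIn ['w', 'r', 'i', 't', 'e'] phrase.toList = true <;>
  by_cases b2 : PySem.Chars.isIn ['w', 'r', 'i', 't', 't', 'e', 'n'] phrase.toList = true <;>
  by_cases b3 : PySem.Chars.isIn ['v', 'e', 'r', 'b', 'a', 'l'] phrase.toList = true <;>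
  by_cases b4 : PySem.Chars.isIn ['a', 'u', 'r', 'a', 'l'] phrase.toList = true <;>
  by_cases b5 : PySem.Chars.isIn ['t', 'e', 'a', 'm'] phrase.toList = true <;>
  by_cases b6 : PySem.Chars.isIn ['t', 'e', 'a', 'm', 'w', 'o', 'r', 'k'] phrase.toList = true <;>
  simp [skillLabels, List.filter, hw, hv, ha, ht, b1, b2, b3, b4, b5, b6, PySem.Set.empty, List.append_assoc]
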